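-- pv_equiv track=rewrite | github.com/fmaa23/sim_rl | foundations/supporting_functions.py | make_unique_edge_type
-- ===== SOURCE A (Python) =====
-- def get_connection_info(adjacent_list):
--     """
--     Generates a dictionary mapping each node to a list of nodes that connect to it.
--
--     Parameters:
--     - adjacent_list (dict): A dictionary representing the network's adjacency list.
--
--     Returns:
--     - dict: A dictionary where keys are end nodes, and values are lists of start nodes that connect to these end nodes.
--     """
--     connection_info = {}
--
--     for start_node, end_node_list in adjacent_list.items():
--
--         for end_node in end_node_list:
--             connect_start_node_list = connection_info.setdefault(end_node, [])
--             connect_start_node_list.append(start_node)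
--             connection_info[end_node] = connect_start_node_list
--
--     return connection_info
--
-- def make_unique_edge_type(adjacent_list, edge_list):
--     """
--     Assigns a unique edge type to connections between nodes based on the adjacency and edge lists.
--
--     Parameters:
--     - adjacent_list (dict): A dictionary representing the network's adjacency list.
--     - edge_list (dict): A dictionary representing the network's edge list, indicating connections between nodes.
--
--     Returns:
--     - dict: A dictionary where keys are node identifiers, and values are lists of unique edge types for edges ending at that node.
--     """
--
--     connection_info = get_connection_info(adjacent_list)
--     edge_type_info = {}
--
--     for end_node in connection_info.keys():
--         start_node_list = connection_info[end_node]
--         edge_type_list = []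
--
--         for start_node in start_node_list:
--             edge_type = edge_list[start_node][end_node]
--             edge_type_list.append(edge_type)
--
--         edge_type_info[end_node] = edge_type_list
--     return edge_type_info # keys are target node_id, values are the edge_types
-- ===== SOURCE B (Python) =====
-- def make_unique_edge_type(adjacent_list, edge_list):
--     pairs = [(e, edge_list[s][e]) for s, ends in adjacent_list.items() for e in ends]
--     seen = []
--     for e, _ in pairs:
--         if e not in seen:
--             seen.append(e)
--     return {e: [v for e2, v in pairs if e2 == e] for e in seen}
-- ===== Notes on version B (the rewrite author's own statement) =====
-- stated objective: alternative
-- what changed: Drops the two-pass design (build a connection_info dict of incoming start nodes, then a second pass of lookups): B flattens the adjacency into (end_node, edge_type) pairs in one comprehension, deduplicates the end nodes in first-appearance order, and groups values by a per-key filter.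
import Mathlib
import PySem

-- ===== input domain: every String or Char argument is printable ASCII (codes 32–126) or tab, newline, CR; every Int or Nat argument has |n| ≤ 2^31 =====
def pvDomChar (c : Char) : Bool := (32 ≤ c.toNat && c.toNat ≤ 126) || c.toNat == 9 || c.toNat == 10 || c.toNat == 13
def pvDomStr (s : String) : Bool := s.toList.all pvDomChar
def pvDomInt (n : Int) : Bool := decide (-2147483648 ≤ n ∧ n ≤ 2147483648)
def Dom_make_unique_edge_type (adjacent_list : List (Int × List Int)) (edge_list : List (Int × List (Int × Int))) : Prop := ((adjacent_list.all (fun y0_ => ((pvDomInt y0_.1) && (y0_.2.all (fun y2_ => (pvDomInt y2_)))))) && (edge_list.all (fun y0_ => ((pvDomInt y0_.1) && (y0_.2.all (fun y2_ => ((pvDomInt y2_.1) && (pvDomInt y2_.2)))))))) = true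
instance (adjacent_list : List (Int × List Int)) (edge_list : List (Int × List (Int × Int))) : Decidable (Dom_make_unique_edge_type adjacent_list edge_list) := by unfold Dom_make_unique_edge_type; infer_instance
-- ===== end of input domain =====

-- B replaces the two-pass connection_info construction by flattening to (end_node, edge_type)
-- pairs, deduplicating the end nodes, and grouping by a per-key filter (objective: alternative).

-- ===== PORT A =====
-- edge_list[start_node][end_node]; the `getD … 0` default is never hit on Pre_ (Python raises KeyError there)
def pvEdgeGet (edge_list : List (Int × List (Int × Int))) (s e : Int) : Int :=
  (PySem.Dict.mk ((PySem.Dict.mk edge_list).getD s [])).getD e 0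

def get_connection_info (adjacent_list : List (Int × List Int)) : PySem.Dict Int (List Int) :=
  adjacent_list.foldl
    (fun ci p => p.2.foldl (fun ci e => ci.modify e [] (· ++ [p.1])) ci)
    PySem.Dict.empty

def make_unique_edge_type (adjacent_list : List (Int × List Int)) (edge_list : List (Int × List (Int × Int))) : List (Int × List Int) :=
  let ci := get_connection_info adjacent_list
  (ci.keys.foldl
    (fun eti e =>
      let start_node_list := ci.getD e []
      let edge_type_list := start_node_list.foldl (fun acc s => acc ++ [pvEdgeGet edge_list s e]) []
      eti.insert e edge_type_list)
    PySem.Dict.empty).items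

-- ===== PORT B =====
def make_unique_edge_type_alt (adjacent_list : List (Int × List Int)) (edge_list : List (Int × List (Int × Int))) : List (Int × List Int) :=
  let pairs := adjacent_list.foldl (fun acc p => acc ++ p.2.map (fun e => (e, pvEdgeGet edge_list p.1 e))) []
  let seen := pairs.foldl (fun s q => PySem.Set.add s q.1) ([] : PySem.Set Int)
  (seen.foldl
    (fun d e => d.insert e ((pairs.filter (fun q => q.1 == e)).map (·.2)))
    PySem.Dict.empty).items

-- ===== PRECONDITION & SPEC =====
-- Pre_ excludes inputs on which Python A raises KeyError: some listed end node whose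
-- start or end key is absent from edge_list (B raises the same KeyError there).
def Pre_make_unique_edge_type (adjacent_list : List (Int × List Int)) (edge_list : List (Int × List (Int × Int))) : Prop :=
  ∀ p ∈ adjacent_list, ∀ e ∈ p.2,
    (PySem.Dict.mk edge_list).contains p.1 = true ∧
    (PySem.Dict.mk ((PySem.Dict.mk edge_list).getD p.1 [])).contains e = true
instance (adjacent_list : List (Int × List Int)) (edge_list : List (Int × List (Int × Int))) : Decidable (Pre_make_unique_edge_type adjacent_list edge_list) := by unfold Pre_make_unique_edge_type; infer_instance

def pvWitness_make_unique_edge_type : (List (Int × List Int)) × (List (Int × List (Int × Int))) :=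
  ([(1, [2, 3]), (2, [3])], [(1, [(2, 10), (3, 11)]), (2, [(3, 12)])])

def Spec_make_unique_edge_type (adjacent_list : List (Int × List Int)) (edge_list : List (Int × List (Int × Int))) (out : List (Int × List Int)) : Prop := out = make_unique_edge_type_alt adjacent_list edge_list
instance (adjacent_list : List (Int × List Int)) (edge_list : List (Int × List (Int × Int))) (out : List (Int × List Int)) : Decidable (Spec_make_unique_edge_type adjacent_list edge_list out) := by unfold Spec_make_unique_edge_type; infer_instance

-- ===== CLAIM (what is proved, stated in full; the proofs are below) =====
def Claim_equal_make_unique_edge_type : Prop := ∀ (adjacent_list : List (Int × List Int)) (edge_list : List (Int × List (Int × Int))), Dom_make_unique_edge_type adjacent_list edge_list → Pre_make_unique_edge_type adjacent_list edge_list → Spec_make_unique_edge_type adjacent_list edge_list (make_unique_edge_type adjacent_list edge_list)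

-- ===== LEMMAS AND PROOFS =====

-- the flattened (end_node, start_node) pair list both sides implicitly traverse
def pvPairsSE (adjacent_list : List (Int × List Int)) : List (Int × Int) :=
  adjacent_list.flatMap (fun p => p.2.map (fun e => (e, p.1)))

theorem pv_ci_eq_gen (adjacent_list : List (Int × List Int)) (d : PySem.Dict Int (List Int)) :
    adjacent_list.foldl
        (fun ci p => p.2.foldl (fun ci e => ci.modify e [] (· ++ [p.1])) ci) d
      = (pvPairsSE adjacent_list).foldl (fun d q => d.modify q.1 [] (· ++ [q.2])) d := by
  induction adjacent_list generalizing d with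
  | nil => simp [pvPairsSE]
  | cons p rest ih =>
      simp only [List.foldl_cons, pvPairsSE, List.flatMap_cons, List.foldl_append, List.foldl_map]
      rw [ih]
      rfl

theorem pv_ci_eq (adjacent_list : List (Int × List Int)) :
    get_connection_info adjacent_list
      = (pvPairsSE adjacent_list).foldl (fun d q => d.modify q.1 [] (· ++ [q.2])) PySem.Dict.empty :=
  pv_ci_eq_gen adjacent_list PySem.Dict.empty

theorem pv_pairs_eq (adjacent_list : List (Int × List Int)) (edge_list : List (Int × List (Int × Int))) :
    adjacent_list.foldl (fun acc p => acc ++ p.2.map (fun e => (e, pvEdgeGet edge_list p.1 e))) []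
      = (pvPairsSE adjacent_list).map (fun q => (q.1, pvEdgeGet edge_list q.2 q.1)) := by
  have gen : ∀ (al : List (Int × List Int)) (acc : List (Int × Int)),
      al.foldl (fun acc p => acc ++ p.2.map (fun e => (e, pvEdgeGet edge_list p.1 e))) acc
        = acc ++ (pvPairsSE al).map (fun q => (q.1, pvEdgeGet edge_list q.2 q.1)) := by
    intro al
    induction al with
    | nil => intro acc; simp [pvPairsSE]
    | cons p rest ih =>
        intro acc
        simp [pvPairsSE, List.flatMap_cons, ih, List.map_map, Function.comp]
  simpa using gen adjacent_list []

theorem pv_foldl_append_map {α β : Type} (l : List α) (f : α → β) (acc : List β) :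
    l.foldl (fun acc s => acc ++ [f s]) acc = acc ++ l.map f := by
  induction l generalizing acc with
  | nil => simp
  | cons x xs ih => simp [List.foldl, ih]

theorem make_unique_edge_type_spec : Claim_equal_make_unique_edge_type := by
  intro al el _hdom _hpre
  unfold Spec_make_unique_edge_type make_unique_edge_type make_unique_edge_type_alt
  dsimp only
  rw [pv_pairs_eq al el]
  set pairs := pvPairsSE al with hpairs
  set pairsEV := pairs.map (fun q => (q.1, pvEdgeGet el q.2 q.1)) with hEV
  have hkeys : (get_connection_info al).keys = PySem.Set.ofList (pairs.map (·.1)) := by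
    rw [pv_ci_eq]
    rw [PySem.Dict.keys_foldl_modify_key pairs (·.1) [] (fun d q => (· ++ [q.2])) PySem.Dict.empty]
    simp [PySem.Dict.keys_empty, PySem.Set.update_nil_left]
  have hgetD : ∀ e : Int, (get_connection_info al).getD e []
      = (pairs.filter (fun q => q.1 == e)).map (·.2) := by
    intro e
    rw [pv_ci_eq]
    simpa using PySem.Dict.getD_foldl_modify_append pairs PySem.Dict.empty e
  have hseen : pairsEV.foldl (fun s q => PySem.Set.add s q.1) ([] : PySem.Set Int)
      = PySem.Set.ofList (pairs.map (·.1)) := by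
    rw [← PySem.Set.update_map_eq_foldl_add, PySem.Set.update_nil_left, hEV,
        List.map_map]
    rfl
  rw [hseen]
  set ks := PySem.Set.ofList (pairs.map (·.1)) with hks
  have hnd : ks.Nodup := PySem.Set.nodup_ofList _
  have hA := PySem.Dict.items_foldl_insert_fresh
      (l := ks) (k := fun e => e)
      (v := fun e => ((get_connection_info al).getD e []).foldl (fun acc s => acc ++ [pvEdgeGet el s e]) [])
      (d := PySem.Dict.empty) (by intro a _; exact PySem.Dict.contains_empty a) (by simpa using hnd)
  have hB := PySem.Dict.items_foldl_insert_fresh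
      (l := ks) (k := fun e => e)
      (v := fun e => (pairsEV.filter (fun q => q.1 == e)).map (·.2))
      (d := PySem.Dict.empty) (by intro a _; exact PySem.Dict.contains_empty a) (by simpa using hnd)
  rw [hkeys, ← hks] at *
  rw [hA, hB]
  simp only [show (PySem.Dict.empty : PySem.Dict Int (List Int)).items = [] from rfl, List.nil_append]
  apply List.map_congr_left
  intro e _
  refine congrArg (fun l => (e, l)) ?_
  rw [hgetD e, pv_foldl_append_map, List.nil_append, hEV, List.filter_map]
  rw [List.map_map, List.map_map]
  apply List.map_congr_left
  intro q hq
  have : q.1 == e := by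
    have := List.of_mem_filter hq
    simpa using this
  simp [Function.comp]
  have h1 : q.1 = e := by simpa using this
  rw [h1]
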